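-- pv_equiv track=rewrite | github.com/MyNameIsTrez/Advent-Of-Code-2021 | code/13a.py | get_bottom_right
-- ===== SOURCE A (Python) =====
-- def get_bottom_right(coordinates):
-- 	max_x = minimum_y = 0
-- 	for coordinate in coordinates:
-- 		if coordinate["x"] > max_x:
-- 			max_x = coordinate["x"]
-- 		if coordinate["y"] > minimum_y:
-- 			minimum_y = coordinate["y"]
-- 	return { "x": max_x, "y": minimum_y }
-- ===== SOURCE B (Python) =====
-- def get_bottom_right(coordinates):
-- 	xs = sorted([0] + [c["x"] for c in coordinates])
-- 	ys = sorted([0] + [c["y"] for c in coordinates])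
-- 	return {"x": xs[-1], "y": ys[-1]}
-- ===== Notes on version B (the rewrite author's own statement) =====
-- stated objective: alternative
-- what changed: Replaces the single compare-and-assign scan with a sort-based algorithm: build the two projected value lists (with 0 included as the floor), sort each ascending, and take the last element as the maximum.
import Mathlib
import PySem

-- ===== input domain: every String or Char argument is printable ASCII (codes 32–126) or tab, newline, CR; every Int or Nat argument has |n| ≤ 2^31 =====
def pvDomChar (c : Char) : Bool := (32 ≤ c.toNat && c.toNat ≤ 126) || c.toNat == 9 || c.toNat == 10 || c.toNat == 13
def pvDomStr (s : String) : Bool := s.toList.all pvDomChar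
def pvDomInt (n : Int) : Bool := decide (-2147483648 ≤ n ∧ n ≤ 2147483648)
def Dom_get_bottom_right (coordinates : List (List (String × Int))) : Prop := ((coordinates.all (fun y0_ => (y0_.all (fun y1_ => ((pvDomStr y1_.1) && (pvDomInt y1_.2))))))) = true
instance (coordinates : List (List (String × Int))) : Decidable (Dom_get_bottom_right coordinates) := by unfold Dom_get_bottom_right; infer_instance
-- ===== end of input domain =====

-- B replaces A's compare-and-assign scan by a different algorithm: it sorts each
-- projected value list (with 0 included as the floor) and takes the last element.


-- ===== PORT A =====
-- coordinate["x"] / coordinate["y"]: inside Pre_ the key is present, so the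
-- getD default 0 is never used (Python raises KeyError exactly outside Pre_).
def get_bottom_right (coordinates : List (List (String × Int))) : List (String × Int) :=
  let st := coordinates.foldl
    (fun (acc : Int × Int) coordinate =>
      let acc1 :=
        if PySem.Dict.getD (PySem.Dict.ofList coordinate) "x" 0 > acc.1 then
          (PySem.Dict.getD (PySem.Dict.ofList coordinate) "x" 0, acc.2)
        else acc
      if PySem.Dict.getD (PySem.Dict.ofList coordinate) "y" 0 > acc1.2 then
        (acc1.1, PySem.Dict.getD (PySem.Dict.ofList coordinate) "y" 0)
      else acc1)
    (0, 0)
  [("x", st.1), ("y", st.2)]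

-- ===== PORT B =====
-- sorted([0] + [c[k] for c in coordinates]) → PySem.List.sorted on 0 :: projected list;
-- xs[-1] → pyGet? xs (-1); the list contains 0 so it is never empty and the
-- .getD 0 default (Python's IndexError) is unreachable.
def get_bottom_right_alt (coordinates : List (List (String × Int))) : List (String × Int) :=
  let xs := PySem.List.sorted ((0 : Int) :: coordinates.map (fun c => PySem.Dict.getD (PySem.Dict.ofList c) "x" 0)) (fun v => v) false
  let ys := PySem.List.sorted ((0 : Int) :: coordinates.map (fun c => PySem.Dict.getD (PySem.Dict.ofList c) "y" 0)) (fun v => v) false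
  [("x", (PySem.List.pyGet? xs (-1)).getD 0), ("y", (PySem.List.pyGet? ys (-1)).getD 0)]

-- ===== PRECONDITION & SPEC =====
-- Pre_ excludes exactly the inputs where a coordinate lacks an "x" or "y" key,
-- on which both A and B raise KeyError.
def Pre_get_bottom_right (coordinates : List (List (String × Int))) : Prop :=
  ∀ c ∈ coordinates, "x" ∈ c.map Prod.fst ∧ "y" ∈ c.map Prod.fst
instance (coordinates : List (List (String × Int))) : Decidable (Pre_get_bottom_right coordinates) := by unfold Pre_get_bottom_right; infer_instance
def pvWitness_get_bottom_right : (List (List (String × Int))) := [[("x", 3), ("y", -4)], [("x", -1), ("y", 7)]]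
def Spec_get_bottom_right (coordinates : List (List (String × Int))) (out : List (String × Int)) : Prop := out = get_bottom_right_alt coordinates
instance (coordinates : List (List (String × Int))) (out : List (String × Int)) : Decidable (Spec_get_bottom_right coordinates out) := by unfold Spec_get_bottom_right; infer_instance

-- ===== CLAIM (what is proved, stated in full; the proofs are below) =====
def Claim_equal_get_bottom_right : Prop := ∀ (coordinates : List (List (String × Int))), Dom_get_bottom_right coordinates → Pre_get_bottom_right coordinates → Spec_get_bottom_right coordinates (get_bottom_right coordinates)

-- ===== LEMMAS AND PROOFS =====

-- A's interleaved two-accumulator fold splits into two componentwise max folds.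
lemma fold_split (fx fy : List (String × Int) → Int) :
    ∀ (xs : List (List (String × Int))) (a b : Int),
      xs.foldl
        (fun (acc : Int × Int) c =>
          let acc1 := if fx c > acc.1 then (fx c, acc.2) else acc
          if fy c > acc1.2 then (acc1.1, fy c) else acc1)
        (a, b)
      = (xs.foldl (fun m c => max m (fx c)) a, xs.foldl (fun m c => max m (fy c)) b) := by
  intro xs
  induction xs with
  | nil => intro a b; rfl
  | cons c xs ih =>
    intro a b
    simp only [List.foldl_cons]
    rw [ih]
    have hx : max a (fx c) = if fx c > a then fx c else a := by
      simp [max_def]; omega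
    have hy : max b (fy c) = if fy c > b then fy c else b := by
      simp [max_def]; omega
    split_ifs at hx hy ⊢ <;> simp_all

-- foldl max bounds every element (and the seed) from above.
lemma le_foldl_max : ∀ (l : List Int) (a : Int), a ≤ l.foldl max a ∧ ∀ b ∈ l, b ≤ l.foldl max a := by
  intro l
  induction l with
  | nil => simp
  | cons x t ih =>
    intro a
    have h := ih (max a x)
    constructor
    · exact le_trans (le_max_left a x) h.1
    · intro b hb
      rcases List.mem_cons.mp hb with rfl | hb
      · exact le_trans (le_max_right a b) h.1
      · exact h.2 b hb

-- pulling a max out of the seed of foldl max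
lemma foldl_max_init : ∀ (t : List Int) (a x : Int), t.foldl max (max a x) = max a (t.foldl max x) := by
  intro t
  induction t with
  | nil => intro a x; rfl
  | cons y t ih => intro a x; simp only [List.foldl_cons, max_assoc, ih]

-- the last element of a ≤-sorted nonempty list is its foldl max
lemma getLast_pairwise : ∀ (t : List Int) (x : Int), (x :: t).Pairwise (· ≤ ·) →
    (x :: t).getLast (by simp) = t.foldl max x := by
  intro t
  induction t with
  | nil => intro x _; rfl
  | cons y t ih =>
    intro x hp
    have hxy : x ≤ y := (List.pairwise_cons.mp hp).1 y (by simp)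
    have hp' : (y :: t).Pairwise (· ≤ ·) := (List.pairwise_cons.mp hp).2
    have : (x :: y :: t).getLast (by simp) = (y :: t).getLast (by simp) := by
      simp [List.getLast]
    rw [this, ih y hp']
    simp only [List.foldl_cons]
    rw [max_eq_right hxy]

-- main lemma: last of sorted (0 :: m) = foldl max 0 m
lemma sorted_last_eq_foldl_max (m : List Int) :
    (PySem.List.pyGet? (PySem.List.sorted ((0 : Int) :: m) (fun v => v) false) (-1)).getD 0
      = m.foldl max 0 := by
  have hperm := PySem.List.sorted_perm ((0 : Int) :: m) (fun v => v) false
  have hpw := PySem.List.sorted_pairwise ((0 : Int) :: m) (fun v => v)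
  have hne : PySem.List.sorted ((0 : Int) :: m) (fun v => v) false ≠ [] := by
    intro h
    have := hperm.length_eq
    simp [h] at this
  obtain ⟨s, t, hst⟩ := List.exists_cons_of_ne_nil hne
  rw [PySem.List.pyGet?_neg_one, hst]
  have hlast : (s :: t).getLast? = some ((s :: t).getLast (by simp)) := by
    simp [List.getLast?_eq_some_getLast]
  rw [hlast]
  simp only [Option.getD_some]
  have hpw' : (s :: t).Pairwise (· ≤ ·) := by
    have := hpw
    rw [hst] at this
    exact this
  rw [getLast_pairwise t s hpw']
  -- foldl max over the sorted list equals foldl max over the original, by Perm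
  have hperm' : (s :: t).Perm ((0 : Int) :: m) := by rw [← hst]; exact hperm
  have hfold : (s :: t).foldl max 0 = ((0 : Int) :: m).foldl max 0 := hperm'.foldl_eq 0
  have h0mem : (0 : Int) ∈ s :: t := hperm'.mem_iff.mpr (by simp)
  have h0le : (0 : Int) ≤ t.foldl max s := by
    rcases List.mem_cons.mp h0mem with h | h
    · exact h ▸ (le_foldl_max t s).1
    · exact (le_foldl_max t s).2 0 h
  have : (s :: t).foldl max 0 = t.foldl max s := by
    simp only [List.foldl_cons]
    rw [foldl_max_init t 0 s, max_eq_right h0le]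
  rw [← this, hfold]
  simp [max_self]

-- ===== VERDICT (by name: the statement is the Claim_ definition above) =====
theorem get_bottom_right_spec : Claim_equal_get_bottom_right := by
  intro coordinates _ _
  unfold Spec_get_bottom_right get_bottom_right get_bottom_right_alt
  rw [fold_split]
  simp only [sorted_last_eq_foldl_max, List.foldl_map]
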